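-- pv_equiv track=rewrite | github.com/sabrina-wen/cautious-happiness | shading.py | vertices_polygons
-- ===== SOURCE A (Python) =====
-- def vertices_polygons(polygons, polygon_v) :
--     #dict with vertices as keys, list of polygon indices as value
--     #go through polygons
--     vertices = dict()
--     for v in polygons:
--         #if we don't already have an entry
--         #stringify v
--         vertex = ' '.join(str(e) for e in v)
--         if vertex not in vertices:
--             #create a list with all polygons containing vertex
--             p_with_v = [];
--             #traverse through our dict containing polygons and their vertices
--             for poly in polygon_v:
--                 #if our vertex is in that list of vertices
--                 if v in polygon_v[poly]:
--                     #include the index of the polygon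
--                     p_with_v.append(poly)
--             #add the vertex and its list of polygon indices to the vertices dict
--             vertices[vertex] = p_with_v
--     return vertices
-- ===== SOURCE B (Python) =====
-- def vertices_polygons(polygons, polygon_v):
--     # Build an inverted index vertex-tuple -> list of polygon keys in one pass
--     # over polygon_v, then answer each polygon's query by a single lookup.
--     index = {}
--     for poly in polygon_v:
--         seen = set()
--         for v in polygon_v[poly]:
--             k = tuple(v)
--             if k not in seen:
--                 seen.add(k)
--                 index[k] = index.get(k, []) + [poly]
--     vertices = {}
--     for v in polygons:
--         s = ' '.join(str(e) for e in v)
--         if s not in vertices: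
--             vertices[s] = index.get(tuple(v), [])
--     return vertices
-- ===== Notes on version B (the rewrite author's own statement) =====
-- stated objective: faster
-- what changed: Replaces the per-distinct-vertex scan over all polygons (membership test against each polygon's vertex list) with an inverted index vertex->polygon-keys built in one pass over polygon_v, so each output entry is a single dictionary lookup; Pre_ only excludes association lists with duplicate keys, an artefact of encoding the Python dict polygon_v (a real dict cannot have them).
import Mathlib
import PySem

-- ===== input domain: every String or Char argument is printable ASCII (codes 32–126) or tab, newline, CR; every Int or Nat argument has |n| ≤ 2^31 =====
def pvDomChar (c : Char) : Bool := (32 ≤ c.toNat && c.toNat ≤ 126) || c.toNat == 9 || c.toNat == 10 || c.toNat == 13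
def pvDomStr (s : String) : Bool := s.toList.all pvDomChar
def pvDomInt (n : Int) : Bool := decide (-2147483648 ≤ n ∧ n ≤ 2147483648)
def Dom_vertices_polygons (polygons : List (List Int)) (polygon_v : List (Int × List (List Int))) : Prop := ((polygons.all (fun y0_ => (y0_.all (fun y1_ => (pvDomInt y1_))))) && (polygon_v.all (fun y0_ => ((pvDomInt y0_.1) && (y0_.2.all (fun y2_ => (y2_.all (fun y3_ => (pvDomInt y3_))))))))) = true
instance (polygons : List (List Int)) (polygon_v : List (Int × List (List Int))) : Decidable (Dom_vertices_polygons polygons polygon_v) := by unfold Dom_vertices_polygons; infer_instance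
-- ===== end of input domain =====

-- B replaces A's per-distinct-vertex scan over every polygon with an inverted index
-- vertex -> polygon keys built in one pass over polygon_v; each output entry is then one lookup.

-- ===== PORT A =====
def vertices_polygons (polygons : List (List Int)) (polygon_v : List (Int × List (List Int))) : List (String × List Int) :=
  (polygons.foldl (fun (vertices : PySem.Dict String (List Int)) v =>
    let vertex := PySem.Str.join " " (v.map PySem.Int.toStr)
    if vertices.contains vertex then vertices
    else
      let p_with_v := polygon_v.foldl (fun (acc : List Int) kv =>
        if v ∈ (PySem.Dict.mk polygon_v).getD kv.1 [] then acc ++ [kv.1] else acc) []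
      vertices.insert vertex p_with_v) PySem.Dict.empty).items

-- ===== PORT B =====
-- one pair (poly, verts) of polygon_v: record poly for each distinct vertex of verts
def vpIndexStep (idx : PySem.Dict (List Int) (List Int)) (pv : Int × List (List Int)) :
    PySem.Dict (List Int) (List Int) :=
  (pv.2.foldl (fun (st : PySem.Dict (List Int) (List Int) × PySem.Set (List Int)) v =>
      if v ∈ st.2 then st
      else (st.1.modify v [] (· ++ [pv.1]), PySem.Set.add st.2 v))
    (idx, PySem.Set.empty)).1

def vertices_polygons_alt (polygons : List (List Int)) (polygon_v : List (Int × List (List Int))) : List (String × List Int) :=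
  let index := polygon_v.foldl vpIndexStep PySem.Dict.empty
  (polygons.foldl (fun (vertices : PySem.Dict String (List Int)) v =>
    let s := PySem.Str.join " " (v.map PySem.Int.toStr)
    if vertices.contains s then vertices
    else vertices.insert s (index.getD v [])) PySem.Dict.empty).items

-- ===== PRECONDITION & SPEC =====
-- Pre_ excludes association lists with duplicate keys, which cannot arise from the Python
-- dict polygon_v: they are an artefact of the assoc-list encoding, on which first-match
-- lookup (A) and pairwise iteration (B) legitimately disagree.
def Pre_vertices_polygons (_polygons : List (List Int)) (polygon_v : List (Int × List (List Int))) : Prop :=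
  (polygon_v.map Prod.fst).Nodup
instance (polygons : List (List Int)) (polygon_v : List (Int × List (List Int))) : Decidable (Pre_vertices_polygons polygons polygon_v) := by unfold Pre_vertices_polygons; infer_instance
def pvWitness_vertices_polygons : List (List Int) × (List (Int × List (List Int))) :=
  ([[1, 2], [3]], [(0, [[1, 2]]), (1, [[3], [1, 2]])])
def Spec_vertices_polygons (polygons : List (List Int)) (polygon_v : List (Int × List (List Int))) (out : List (String × List Int)) : Prop := out = vertices_polygons_alt polygons polygon_v
instance (polygons : List (List Int)) (polygon_v : List (Int × List (List Int))) (out : List (String × List Int)) : Decidable (Spec_vertices_polygons polygons polygon_v out) := by unfold Spec_vertices_polygons; infer_instance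

-- ===== CLAIM (what is proved, stated in full; the proofs are below) =====
def Claim_equal_vertices_polygons : Prop := ∀ (polygons : List (List Int)) (polygon_v : List (Int × List (List Int))), Dom_vertices_polygons polygons polygon_v → Pre_vertices_polygons polygons polygon_v → Spec_vertices_polygons polygons polygon_v (vertices_polygons polygons polygon_v)

-- ===== LEMMAS AND PROOFS =====

-- the per-pair fold of vpIndexStep, seen through getD
theorem vpInner_getD (poly : Int) (verts : List (List Int))
    (idx : PySem.Dict (List Int) (List Int)) (seen : PySem.Set (List Int)) (v : List Int) :
    ((verts.foldl (fun (st : PySem.Dict (List Int) (List Int) × PySem.Set (List Int)) w =>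
        if w ∈ st.2 then st
        else (st.1.modify w [] (· ++ [poly]), PySem.Set.add st.2 w))
      (idx, seen)).1).getD v [] =
    idx.getD v [] ++ (if v ∉ seen ∧ v ∈ verts then [poly] else []) := by
  induction verts generalizing idx seen with
  | nil => simp
  | cons w rest ih =>
    simp only [List.foldl_cons]
    by_cases hw : w ∈ seen
    · simp only [hw, if_pos, ih]
      congr 1
      by_cases hv : v = w
      · subst hv; simp [hw]
      · simp [List.mem_cons, hv]
    · simp only [hw, if_neg, not_false_iff, ih]
      rw [PySem.Dict.getD_modify]
      by_cases hv : v = w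
      · subst hv
        simp [hw]
      · simp only [if_neg hv]
        congr 1
        simp [PySem.Set.mem_add, hv, List.mem_cons]

theorem vpIndexStep_getD (idx : PySem.Dict (List Int) (List Int))
    (pv : Int × List (List Int)) (v : List Int) :
    (vpIndexStep idx pv).getD v [] =
      idx.getD v [] ++ (if v ∈ pv.2 then [pv.1] else []) := by
  unfold vpIndexStep
  rw [vpInner_getD]
  simp [PySem.Set.empty]

theorem vpIndex_getD (l : List (Int × List (List Int)))
    (idx : PySem.Dict (List Int) (List Int)) (v : List Int) :
    (l.foldl vpIndexStep idx).getD v [] =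
      idx.getD v [] ++ (l.filter (fun kv => decide (v ∈ kv.2))).map Prod.fst := by
  induction l generalizing idx with
  | nil => simp
  | cons kv rest ih =>
    simp only [List.foldl_cons, ih, vpIndexStep_getD, List.filter_cons]
    by_cases h : v ∈ kv.2
    · simp [h, List.append_assoc]
    · simp [h]

-- A's inner scan, under unique keys
theorem aInner_eq (polygon_v : List (Int × List (List Int)))
    (hnd : (polygon_v.map Prod.fst).Nodup) (v : List Int) :
    polygon_v.foldl (fun (acc : List Int) kv =>
        if v ∈ (PySem.Dict.mk polygon_v).getD kv.1 [] then acc ++ [kv.1] else acc) [] =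
      (polygon_v.filter (fun kv => decide (v ∈ kv.2))).map Prod.fst := by
  have hcongr : ∀ (acc : List Int) kv, kv ∈ polygon_v →
      (if v ∈ (PySem.Dict.mk polygon_v).getD kv.1 [] then acc ++ [kv.1] else acc) =
      (if v ∈ kv.2 then acc ++ [kv.1] else acc) := by
    intro acc kv hmem
    have : (PySem.Dict.mk polygon_v).getD kv.1 [] = kv.2 :=
      PySem.Dict.getD_of_mem_items (d := PySem.Dict.mk polygon_v) (k := kv.1) (v := kv.2)
        (by simpa [PySem.Dict.items] using hmem) (by simpa [PySem.Dict.keys, PySem.Dict.items] using hnd) []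
    rw [this]
  have hc := PySem.List.foldl_congr_mem polygon_v _ (fun acc kv => if v ∈ kv.2 then acc ++ [kv.1] else acc) ([] : List Int) hcongr
  rw [hc]
  exact PySem.List.foldl_append_ite (p := fun kv => v ∈ kv.2) (f := Prod.fst) polygon_v []

-- ===== VERDICT (by name: the statement is the Claim_ definition above) =====
theorem vertices_polygons_spec : Claim_equal_vertices_polygons := by
  intro polygons polygon_v _ hpre
  unfold Spec_vertices_polygons vertices_polygons vertices_polygons_alt
  congr 1
  apply PySem.List.foldl_congr_mem _ _ _ _
  intro acc v _
  simp only
  rw [aInner_eq polygon_v hpre v, vpIndex_getD]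
  simp
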